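-- pv_equiv track=rewrite | github.com/cameroneevenson-lgtm/truck_nest_explorer | packet_build_service.py | _aggregate_quantities
-- ===== SOURCE A (Python) =====
-- from typing import Callable, Optional, Sequence
--
-- def _aggregate_quantities(rows: Sequence[tuple[str, int]]) -> dict[str, int]:
--     totals: dict[str, int] = {}
--     for part_key, quantity in rows:
--         key = str(part_key or "").strip().casefold()
--         if not key:
--             continue
--         totals[key] = totals.get(key, 0) + int(quantity)
--     return totals
-- ===== SOURCE B (Python) =====
-- def _aggregate_quantities(rows):
--     pairs = [(str(pk or "").strip().casefold(), int(q)) for pk, q in rows]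
--     keys = list(dict.fromkeys(k for k, _ in pairs if k))
--     return {k: sum(q for kk, q in pairs if kk == k) for k in keys}
-- ===== Notes on version B (the rewrite author's own statement) =====
-- stated objective: alternative
-- what changed: Replaces the running dict accumulation with a normalize-all / ordered-dedup-of-keys / per-key filter-and-sum decomposition (three comprehensions, no mutable running total).
import Mathlib
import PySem

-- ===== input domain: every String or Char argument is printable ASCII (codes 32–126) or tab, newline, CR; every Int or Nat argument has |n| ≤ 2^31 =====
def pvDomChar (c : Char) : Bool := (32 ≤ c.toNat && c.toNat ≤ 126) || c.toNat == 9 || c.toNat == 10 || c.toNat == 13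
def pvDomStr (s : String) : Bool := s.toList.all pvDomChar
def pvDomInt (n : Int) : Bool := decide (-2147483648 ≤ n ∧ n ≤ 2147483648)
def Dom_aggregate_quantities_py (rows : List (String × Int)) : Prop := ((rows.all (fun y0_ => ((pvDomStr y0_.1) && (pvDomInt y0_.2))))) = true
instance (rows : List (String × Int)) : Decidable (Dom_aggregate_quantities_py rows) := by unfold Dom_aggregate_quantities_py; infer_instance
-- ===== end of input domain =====

-- B replaces A's running dict accumulation by normalize-all / ordered key dedup / per-key filter-and-sum
-- (alternative decomposition, same results; .casefold() is ported as PySem.Str.lower, exact on the ASCII domain).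

-- ===== PORT A =====
-- one loop step of A's 'for part_key, quantity in rows' body
def pvStepA (totals : PySem.Dict String Int) (pq : String × Int) : PySem.Dict String Int :=
  let key := PySem.Str.lower (PySem.Str.strip (if pq.1 == "" then "" else pq.1))
  if key == "" then totals
  else totals.insert key (totals.getD key 0 + pq.2)

def aggregate_quantities_py (rows : List (String × Int)) : List (String × Int) :=
  (rows.foldl pvStepA PySem.Dict.empty).items

-- ===== PORT B =====
def aggregate_quantities_py_alt (rows : List (String × Int)) : List (String × Int) :=
  let pairs := rows.map (fun pq =>
    (PySem.Str.lower (PySem.Str.strip (if pq.1 == "" then "" else pq.1)), pq.2))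
  let keys := PySem.List.dedup ((pairs.map Prod.fst).filter (fun k => !(k == "")))
  keys.map (fun k => (k, ((pairs.filter (fun p => p.1 == k)).map Prod.snd).sum))

-- ===== PRECONDITION & SPEC =====
def Spec_aggregate_quantities_py (rows : List (String × Int)) (out : List (String × Int)) : Prop := out = aggregate_quantities_py_alt rows
instance (rows : List (String × Int)) (out : List (String × Int)) : Decidable (Spec_aggregate_quantities_py rows out) := by unfold Spec_aggregate_quantities_py; infer_instance

-- ===== CLAIM (what is proved, stated in full; the proofs are below) =====
def Claim_equal_aggregate_quantities_py : Prop := ∀ (rows : List (String × Int)), Dom_aggregate_quantities_py rows → Spec_aggregate_quantities_py rows (aggregate_quantities_py rows)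

-- ===== LEMMAS AND PROOFS =====

-- A's step, reformulated on an already-normalized pair
def pvS (d : PySem.Dict String Int) (kq : String × Int) : PySem.Dict String Int :=
  if kq.1 == "" then d else d.insert kq.1 (d.getD kq.1 0 + kq.2)

def pvNorm (pq : String × Int) : String × Int :=
  (PySem.Str.lower (PySem.Str.strip (if pq.1 == "" then "" else pq.1)), pq.2)

-- total quantity that the normalized list l carries at key k (B's inner sum)
def pvSum (l : List (String × Int)) (k : String) : Int :=
  ((l.filter (fun p => p.1 == k)).map Prod.snd).sum

theorem pvStepA_eq (d : PySem.Dict String Int) (pq : String × Int) :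
    pvStepA d pq = pvS d (pvNorm pq) := by
  unfold pvStepA pvS pvNorm
  rfl

theorem pv_keys_foldl (l : List (String × Int)) (d : PySem.Dict String Int) :
    (l.foldl pvS d).keys
      = PySem.Set.update d.keys ((l.map Prod.fst).filter (fun k => !(k == ""))) := by
  induction l generalizing d with
  | nil => simp [PySem.Set.update_nil]
  | cons p t ih =>
    by_cases h : p.1 = ""
    · simp [pvS, h, ih]
    · have hb : (p.1 == "") = false := beq_eq_false_iff_ne.mpr h
      have h1 : (p :: t).foldl pvS d = t.foldl pvS (d.insert p.1 (d.getD p.1 0 + p.2)) := by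
        simp only [List.foldl_cons, pvS, hb, Bool.false_eq_true, if_false]
      have h2 : ((p :: t).map Prod.fst).filter (fun k => !(k == ""))
          = p.1 :: ((t.map Prod.fst).filter (fun k => !(k == ""))) := by
        simp [hb]
      rw [h1, h2, PySem.Set.update_cons, ih]
      congr 1
      by_cases hc : (d.contains p.1) = true
      · rw [PySem.Dict.keys_insert_of_contains _ _ hc,
          PySem.Set.add_of_mem ((PySem.Dict.contains_iff_mem_keys _ _).mp hc)]
      · rw [PySem.Dict.keys_insert_of_not_contains _ _ (by simpa using hc),
          PySem.Set.add_of_not_mem (fun hm => hc ((PySem.Dict.contains_iff_mem_keys _ _).mpr hm))]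

theorem pv_nodup_foldl (l : List (String × Int)) (d : PySem.Dict String Int)
    (h : d.keys.Nodup) : (l.foldl pvS d).keys.Nodup := by
  induction l generalizing d with
  | nil => exact h
  | cons p t ih =>
    simp only [List.foldl_cons]
    by_cases hk : p.1 = ""
    · exact ih _ (by simpa [pvS, hk] using h)
    · exact ih _ (by simpa [pvS, hk] using PySem.Dict.nodup_keys_insert _ _ _ h)

theorem pv_getD_foldl (l : List (String × Int)) (d : PySem.Dict String Int)
    (k : String) (hk : k ≠ "") :
    (l.foldl pvS d).getD k 0 = d.getD k 0 + pvSum l k := by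
  induction l generalizing d with
  | nil => simp [pvSum]
  | cons p t ih =>
    simp only [List.foldl_cons]
    by_cases h : p.1 = ""
    · have hne : (p.1 == k) = false := beq_eq_false_iff_ne.mpr (h ▸ Ne.symm hk)
      rw [show pvS d p = d from by simp [pvS, h], ih]
      simp [pvSum, hne]
    · rw [show pvS d p = d.insert p.1 (d.getD p.1 0 + p.2) from by
        simp only [pvS, beq_eq_false_iff_ne.mpr h, Bool.false_eq_true, if_false], ih,
        PySem.Dict.getD_insert]
      by_cases he : k = p.1
      · subst he
        simp [pvSum]
        ring
      · rw [if_neg he]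
        simp [pvSum, beq_eq_false_iff_ne.mpr (Ne.symm he)]

-- ===== VERDICT (by name: the statement is the Claim_ definition above) =====
theorem aggregate_quantities_py_spec : Claim_equal_aggregate_quantities_py := by
  intro rows _
  unfold Spec_aggregate_quantities_py aggregate_quantities_py aggregate_quantities_py_alt
  have hfold : rows.foldl pvStepA PySem.Dict.empty
      = (rows.map pvNorm).foldl pvS PySem.Dict.empty := by
    rw [show pvStepA = fun (d : PySem.Dict String Int) (pq : String × Int) => pvS d (pvNorm pq)
      from funext fun d => funext fun pq => pvStepA_eq d pq, List.foldl_map]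
  rw [hfold]
  have hnd := pv_nodup_foldl (rows.map pvNorm) PySem.Dict.empty (by simp)
  rw [PySem.Dict.items_eq_map_keys _ hnd 0, pv_keys_foldl]
  rw [show PySem.Set.update (PySem.Dict.keys (PySem.Dict.empty : PySem.Dict String Int))
        (((rows.map pvNorm).map Prod.fst).filter (fun k => !(k == "")))
      = PySem.List.dedup (((rows.map pvNorm).map Prod.fst).filter (fun k => !(k == "")))
    from by rw [PySem.Dict.keys_empty, PySem.Set.update_nil_left, PySem.List.dedup_eq_ofList]]
  show _ = (PySem.List.dedup (((rows.map pvNorm).map Prod.fst).filter (fun k => !(k == "")))).map _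
  apply List.map_congr_left
  intro k hkmem
  have hk : k ≠ "" := by
    have h1 : k ∈ ((rows.map pvNorm).map Prod.fst).filter (fun kk => !(kk == "")) := by
      rw [PySem.List.dedup_eq_ofList] at hkmem
      exact (PySem.Set.mem_ofList _ _).mp hkmem
    simpa using (List.of_mem_filter h1)
  rw [pv_getD_foldl (rows.map pvNorm) _ k hk]
  simp only [PySem.Dict.getD_empty, zero_add]
  rfl
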